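-- pv_equiv track=rewrite | github.com/Uber-Career-Prep-2023/Uber-Career-Prep-Edona-Saliu | Assignment - 3/FirstKBinaryNumbers.py | first_k_bin
-- ===== SOURCE A (Python) =====
-- from collections import deque
--
-- def first_k_bin(n):
--     if n == 0:
--         return []
--
--     ans = ["0"]
--     q = deque(["1"])
--     for i in range(n-1):
--         node = q.popleft()
--         ans.append(node)
--
--         q.append(node + "0")
--         q.append(node + "1")
--     return ans
-- ===== SOURCE B (Python) =====
-- def first_k_bin(n):
--     if n == 0:
--         return []
--     return ["0"] + [bin(i)[2:] for i in range(1, n)]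
-- ===== Notes on version B (the rewrite author's own statement) =====
-- stated objective: idiomatic
-- what changed: Replaces the BFS deque of string prefixes with a direct per-index closed form: element i is the binary representation of i computed independently (bin(i)[2:]), no queue and no shared-prefix concatenation.
import Mathlib
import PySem

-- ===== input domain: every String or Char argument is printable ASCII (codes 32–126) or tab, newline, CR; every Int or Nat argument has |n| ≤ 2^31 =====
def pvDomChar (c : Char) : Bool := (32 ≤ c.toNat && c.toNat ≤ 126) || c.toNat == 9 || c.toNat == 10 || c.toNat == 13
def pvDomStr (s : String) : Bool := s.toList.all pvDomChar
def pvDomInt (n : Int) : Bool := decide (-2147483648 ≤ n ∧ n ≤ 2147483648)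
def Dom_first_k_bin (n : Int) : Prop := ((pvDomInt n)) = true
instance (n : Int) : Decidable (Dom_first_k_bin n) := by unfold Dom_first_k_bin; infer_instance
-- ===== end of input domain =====

-- B replaces A's BFS deque of binary-string prefixes by computing each element
-- independently from its index (binary representation of i); idiomatic, same cost.
-- Strings are built as String.mk over List Char (exact: Python str concatenation).

-- ===== PORT A =====
-- one loop iteration: popleft a node, append it to ans, push node+"0", node+"1"
-- (the queue is never empty when popped: it starts with one element and grows by one
-- each iteration, so the [] branch is a totality guard only)
def fkbStep (st : List (List Char) × List (List Char)) :
    List (List Char) × List (List Char) :=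
  match st with
  | (ans, []) => (ans, [])
  | (ans, node :: q) => (ans ++ [node], q ++ [node ++ ['0'], node ++ ['1']])

def first_k_bin (n : Int) : List String :=
  if n == 0 then []
  else
    let st := (PySem.List.pyRange 0 (n - 1) 1).foldl (fun st _ => fkbStep st)
      ([['0']], [['1']])
    st.1.map String.mk

-- ===== PORT B =====
-- bin(i)[2:] for i ≥ 1, built by repeated divmod by 2 (exact for positive i)
def binChars (i : Nat) : List Char :=
  if h : i = 0 then []
  else binChars (i / 2) ++ [if i % 2 = 1 then '1' else '0']
decreasing_by exact Nat.div_lt_self (Nat.pos_of_ne_zero h) (by norm_num)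

def first_k_bin_alt (n : Int) : List String :=
  if n == 0 then []
  else "0" :: (PySem.List.pyRange 1 n 1).map (fun i => String.mk (binChars i.toNat))

-- ===== PRECONDITION & SPEC =====
def Spec_first_k_bin (n : Int) (out : List String) : Prop := out = first_k_bin_alt n
instance (n : Int) (out : List String) : Decidable (Spec_first_k_bin n out) := by
  unfold Spec_first_k_bin; infer_instance

-- ===== CLAIM (what is proved, stated in full; the proofs are below) =====
def Claim_equal_first_k_bin : Prop := ∀ (n : Int), Dom_first_k_bin n → Spec_first_k_bin n (first_k_bin n)

-- ===== LEMMAS AND PROOFS =====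

theorem binChars_two_mul (k : Nat) (hk : k ≠ 0) :
    binChars (2 * k) = binChars k ++ ['0'] := by
  rw [binChars]
  have h2 : 2 * k ≠ 0 := by omega
  simp [h2, Nat.mul_div_cancel_left k (by norm_num : 0 < 2), Nat.mul_mod_right]

theorem binChars_two_mul_add_one (k : Nat) :
    binChars (2 * k + 1) = binChars k ++ ['1'] := by
  rw [binChars]
  have h2 : 2 * k + 1 ≠ 0 := by omega
  simp [h2, Nat.mul_add_div (by norm_num : 0 < 2), Nat.mul_add_mod]

theorem foldl_ignore {α β : Type} (f : α → α) (l : List β) (init : α) :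
    l.foldl (fun st _ => f st) init = f^[l.length] init := by
  induction l generalizing init with
  | nil => rfl
  | cons x xs ih => simp [List.foldl_cons, ih, Function.iterate_succ_apply]

theorem fkbStep_iterate (m : Nat) :
    fkbStep^[m] ([['0']], [['1']]) =
      (['0'] :: (List.range' 1 m).map binChars,
       (List.range' (m + 1) (m + 1)).map binChars) := by
  induction m with
  | zero =>
    simp [List.range'_one]
    rw [binChars]; simp
    rw [binChars]; simp
  | succ m ih =>
    rw [Function.iterate_succ_apply', ih]
    have hq : List.range' (m + 1) (m + 1) = (m + 1) :: List.range' (m + 2) m :=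
      List.range'_succ ..
    rw [hq]
    simp only [List.map_cons, fkbStep]
    have h1 : List.range' 1 (m + 1) = List.range' 1 m ++ [1 + m] := by
      simpa using List.range'_concat (s := 1) (n := m) (step := 1)
    have h2 : List.range' (m + 2) (m + 2) =
        List.range' (m + 2) m ++ [m + 2 + m] ++ [m + 2 + (m + 1)] := by
      have e1 : List.range' (m + 2) (m + 1 + 1) = List.range' (m + 2) (m + 1) ++ [m + 2 + (m + 1)] := by
        simpa using List.range'_concat (s := m + 2) (n := m + 1) (step := 1)
      have e2 : List.range' (m + 2) (m + 1) = List.range' (m + 2) m ++ [m + 2 + m] := by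
        simpa using List.range'_concat (s := m + 2) (n := m) (step := 1)
      rw [e1, e2]
    rw [h1, h2]
    have hb0 : binChars (m + 2 + m) = binChars (m + 1) ++ ['0'] := by
      have : m + 2 + m = 2 * (m + 1) := by ring
      rw [this, binChars_two_mul (m + 1) (by omega)]
    have hb1 : binChars (m + 2 + (m + 1)) = binChars (m + 1) ++ ['1'] := by
      have : m + 2 + (m + 1) = 2 * (m + 1) + 1 := by ring
      rw [this, binChars_two_mul_add_one (m + 1)]
    simp [hb0, hb1]
    rw [Nat.add_comm 1 m]

theorem first_k_bin_eq_alt (n : Int) : first_k_bin n = first_k_bin_alt n := by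
  unfold first_k_bin first_k_bin_alt
  by_cases h0 : n = 0
  · simp [h0]
  · simp only [beq_iff_eq, h0, if_false]
    rw [PySem.List.pyRange_one 0 (n - 1), PySem.List.pyRange_one 1 n]
    rw [foldl_ignore, List.length_map, List.length_range]
    have hnn : (n - 1 - 0).toNat = (n - 1).toNat := by omega
    rw [hnn, fkbStep_iterate]
    simp only [List.map_cons, List.map_map]
    congr 1
    rw [List.range'_eq_map_range]
    simp only [List.map_map]
    apply List.map_congr_left
    intro k hk
    simp only [Function.comp_apply]
    have : ((1 : Int) + (k : Int)).toNat = 1 + k := by omega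
    rw [this]

-- ===== VERDICT (by name: the statement is the Claim_ definition above) =====
theorem first_k_bin_spec : Claim_equal_first_k_bin := by
  intro n _
  unfold Spec_first_k_bin
  exact first_k_bin_eq_alt n
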